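-- pv_equiv track=rewrite | github.com/Taejin1221/Re-PS | Programmers/Programmers150367.py | solution
-- ===== SOURCE A (Python) =====
-- def can(num, has_root):
--     n = len(num)
--     if n == 0:
--         return True
--
--     root = n // 2
--     left = num[:root]
--     right = num[root + 1:]
--     if has_root:
--         if num[root] == "1":
--             return can(left, True) & can(right, True)
--         else:
--             return can(left, False) & can(right, False)
--     else:
--         if num[root] == "1":
--             return False
--         else:
--             return can(left, False) & can(right, False)
--
-- def solution(numbers):
--     ans = []
--
--     NODES = [1, 3, 7, 15, 31, 63]
--     for number in numbers:
--         bin_num = bin(number)[2:]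
--         n = len(bin_num)
--
--         can_make = False
--         for node in NODES:
--             if n <= node:
--                 if can('0' * (node - n) + bin_num, True):
--                     can_make = True
--                     break
--
--         ans.append(1 if can_make else 0)
--
--     return ans
-- ===== SOURCE B (Python) =====
-- # Same answers as A; validity is checked iteratively with an explicit worklist of
-- # index ranges instead of A's recursion on string slices, and an all-zero subtree
-- # is settled by one membership scan instead of recursing into it.
-- def _fits(s, size):
--     stack = [(0, size)]
--     while stack:
--         lo, hi = stack.pop()
--         mid = (lo + hi) // 2
--         if s[mid] == '1':
--             if lo < mid:
--                 stack.append((lo, mid))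
--             if mid + 1 < hi:
--                 stack.append((mid + 1, hi))
--         elif '1' in s[lo:hi]:
--             return False
--     return True
--
-- def _check(number):
--     bits = bin(number)[2:]
--     n = len(bits)
--     for size in (1, 3, 7, 15, 31, 63):
--         if n <= size and _fits('0' * (size - n) + bits, size):
--             return 1
--     return 0
--
-- def solution(numbers):
--     return [_check(number) for number in numbers]
-- ===== Notes on version B (the rewrite author's own statement) =====
-- stated objective: faster
-- what changed: Replaces A's recursive divide-and-conquer on freshly sliced strings with an iterative explicit-worklist scan over index ranges of the fixed padded string, settling any all-zero subtree with a single membership scan instead of recursing through it.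
import Mathlib
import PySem

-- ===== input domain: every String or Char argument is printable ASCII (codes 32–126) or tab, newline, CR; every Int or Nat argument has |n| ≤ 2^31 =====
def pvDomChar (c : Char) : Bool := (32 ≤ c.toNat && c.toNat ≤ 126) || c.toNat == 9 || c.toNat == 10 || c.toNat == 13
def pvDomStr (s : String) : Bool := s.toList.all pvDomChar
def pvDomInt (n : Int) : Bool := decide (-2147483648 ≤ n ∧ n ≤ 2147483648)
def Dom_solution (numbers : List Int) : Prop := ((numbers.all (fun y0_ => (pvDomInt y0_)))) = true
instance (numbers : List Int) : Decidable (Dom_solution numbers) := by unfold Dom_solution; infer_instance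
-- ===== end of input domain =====

-- B checks tree validity with an explicit worklist of index ranges (and an all-zero scan
-- for dead subtrees) instead of A's recursion on string slices; objective: alternative.

-- ===== PORT A =====
-- bin(number)[2:]  (shared by both Pythons, both of which call bin(number)[2:])
def pyBinTail (number : Int) : List Char :=
  PySem.List.slice (PySem.Int.toBinChars0b number) (some 2) none

def canA (num : List Char) (hasRoot : Bool) : Bool :=
  let n := num.length
  if _hn : n = 0 then
    true
  else
    let root := n / 2
    let left := PySem.List.slice num none (some (root : Int))
    let right := PySem.List.slice num (some ((root : Int) + 1)) none
    if hasRoot then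
      if PySem.List.pyGet? num (root : Int) = some '1' then
        canA left true && canA right true
      else
        canA left false && canA right false
    else
      if PySem.List.pyGet? num (root : Int) = some '1' then
        false
      else
        canA left false && canA right false
termination_by num.length
decreasing_by
  all_goals first
    | (rw [PySem.List.slice_to_natCast]; simp only [List.length_take]; omega)
    | (have h : ((num.length / 2 : Nat) : Int) + 1 = (((num.length / 2 + 1 : Nat)) : Int) := by
         push_cast; ring
       rw [h, PySem.List.slice_from_natCast]; simp only [List.length_drop]; omega)

-- the inner 'for node in NODES' loop of A (with its break)
def tryNodes (binNum : List Char) (n : Nat) : List Nat → Bool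
  | [] => false
  | node :: rest =>
      if n ≤ node then
        if canA (List.replicate (node - n) '0' ++ binNum) true then true
        else tryNodes binNum n rest
      else tryNodes binNum n rest

def solution (numbers : List Int) : List Int :=
  numbers.foldl (fun ans number =>
    let binNum := pyBinTail number
    let n := binNum.length
    ans ++ [if tryNodes binNum n [1, 3, 7, 15, 31, 63] then (1 : Int) else 0]) []

-- ===== PORT B =====
-- worklist loop of _fits; the stack's top is the list head (Python appends/pops at the end),
-- so pushing (lo,mid) then (mid+1,hi) puts (mid+1,hi) on top.
def fitsLoop (s : List Char) : List (Nat × Nat) → Bool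
  | [] => true
  | (lo, hi) :: rest =>
      if _h : lo < hi then
        let mid := (lo + hi) / 2
        if PySem.List.pyGet? s (mid : Int) = some '1' then
          fitsLoop s ((if mid + 1 < hi then [(mid + 1, hi)] else []) ++
                      (if lo < mid then [(lo, mid)] else []) ++ rest)
        else if (PySem.List.slice s (some (lo : Int)) (some (hi : Int))).contains '1' then
          false
        else
          fitsLoop s rest
      else fitsLoop s rest  -- unreachable: only nonempty ranges are ever pushed
termination_by stack => (stack.map (fun p => p.2 - p.1)).sum * 2 + stack.length
decreasing_by
  · simp only [List.map_append, List.sum_append, List.map_cons, List.sum_cons, List.length_append,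
      List.length_cons]
    split <;> split <;> simp <;> omega
  · simp only [List.map_cons, List.sum_cons, List.length_cons]; omega
  · simp only [List.map_cons, List.sum_cons, List.length_cons]; omega

def fits (s : List Char) (size : Nat) : Bool := fitsLoop s [(0, size)]

-- the 'for size in (1,3,7,15,31,63)' loop of _check (early return 1, else 0)
def checkB (bits : List Char) (n : Nat) : List Nat → Int
  | [] => 0
  | size :: rest =>
      if n ≤ size && fits (List.replicate (size - n) '0' ++ bits) size then 1
      else checkB bits n rest

def solution_alt (numbers : List Int) : List Int :=
  numbers.map (fun number =>
    let bits := pyBinTail number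
    checkB bits bits.length [1, 3, 7, 15, 31, 63])

-- ===== PRECONDITION & SPEC =====
def Spec_solution (numbers : List Int) (out : List Int) : Prop := out = solution_alt numbers
instance (numbers : List Int) (out : List Int) : Decidable (Spec_solution numbers out) := by unfold Spec_solution; infer_instance

-- ===== CLAIM (what is proved, stated in full; the proofs are below) =====
def Claim_equal_solution : Prop := ∀ (numbers : List Int), Dom_solution numbers → Spec_solution numbers (solution numbers)

-- ===== LEMMAS AND PROOFS =====

theorem contains_split (s : List Char) (r : Nat) (h : r < s.length) :
    s.contains '1' = ((s.take r).contains '1' || (s[r] == '1') || (s.drop (r+1)).contains '1') := by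
  have h1 : s = s.take r ++ s[r] :: s.drop (r+1) := by
    rw [List.getElem_cons_drop h, List.take_append_drop]
  conv_lhs => rw [h1]
  simp only [List.contains_append, List.contains_cons, Bool.or_assoc]
  rw [Bool.beq_comm]

theorem canA_false (s : List Char) : canA s false = !s.contains '1' := by
  generalize hn : s.length = n
  induction n using Nat.strong_induction_on generalizing s with
  | _ n ih =>
    subst hn
    rw [canA]
    by_cases h0 : s.length = 0
    · simp [List.eq_nil_of_length_eq_zero h0]
    · have hroot : s.length / 2 < s.length := by omega
      have hcast : ((s.length / 2 : Nat) : Int) + 1 = (((s.length / 2 + 1 : Nat)) : Int) := by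
        push_cast; ring
      simp only [h0, dif_neg, not_false_iff, Bool.false_eq_true, if_false,
        PySem.List.slice_to_natCast, hcast, PySem.List.slice_from_natCast,
        PySem.List.pyGet?_natCast, List.getElem?_eq_getElem hroot]
      rw [contains_split s _ hroot]
      split_ifs with hg
      · simp only [Option.some.injEq] at hg
        simp [hg]
      · simp only [Option.some.injEq] at hg
        rw [ih (s.length / 2) (by omega) _ (by simp [List.length_take]; omega),
            ih (s.length - (s.length / 2 + 1)) (by omega) _ (by simp [List.length_drop])]
        have hb : (s[s.length / 2] == '1') = false := by simp [hg]
        simp [hb]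
theorem canA_seg (s : List Char) (lo hi : Nat) (h1 : lo < hi) (h2 : hi ≤ s.length)
    (hmid : (lo + hi) / 2 < s.length) :
    canA ((s.drop lo).take (hi - lo)) true =
      (if s[(lo + hi) / 2]'hmid = '1'
       then canA ((s.drop lo).take ((lo + hi) / 2 - lo)) true &&
            canA ((s.drop ((lo + hi) / 2 + 1)).take (hi - ((lo + hi) / 2 + 1))) true
       else !((s.drop lo).take (hi - lo)).contains '1') := by
  have hlen : ((s.drop lo).take (hi - lo)).length = hi - lo := by
    simp [List.length_take, List.length_drop]; omega
  have hroot : (hi - lo) / 2 < hi - lo := by omega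
  have hidx : lo + (hi - lo) / 2 = (lo + hi) / 2 := by omega
  have hget : ((s.drop lo).take (hi - lo))[(hi - lo) / 2]'(by omega) = s[(lo + hi) / 2]'hmid := by
    rw [List.getElem_take, List.getElem_drop]
    simp only [hidx]
  rw [canA]
  have hcast : (((hi - lo) / 2 : Nat) : Int) + 1 = ((((hi - lo) / 2 + 1 : Nat)) : Int) := by
    push_cast; ring
  simp only [hlen, dif_neg (by omega : ¬ (hi - lo) = 0),
    PySem.List.slice_to_natCast, hcast, PySem.List.slice_from_natCast, if_true,
    PySem.List.pyGet?_natCast, List.getElem?_eq_getElem (by omega : (hi - lo) / 2 < ((s.drop lo).take (hi - lo)).length),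
    hget, Option.some.injEq]
  have htake : ((s.drop lo).take (hi - lo)).take ((hi - lo) / 2) = (s.drop lo).take ((lo + hi) / 2 - lo) := by
    rw [List.take_take]
    have hmin : min ((hi - lo) / 2) (hi - lo) = (lo + hi) / 2 - lo := by omega
    rw [hmin]
  have hdrop : ((s.drop lo).take (hi - lo)).drop ((hi - lo) / 2 + 1) =
      (s.drop ((lo + hi) / 2 + 1)).take (hi - ((lo + hi) / 2 + 1)) := by
    have h3 : lo + ((hi - lo) / 2 + 1) = (lo + hi) / 2 + 1 := by omega
    have h4 : hi - lo - ((hi - lo) / 2 + 1) = hi - ((lo + hi) / 2 + 1) := by omega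
    rw [List.drop_take, List.drop_drop, h3, h4]
  rw [htake, hdrop]
  split_ifs with hg
  · rfl
  · rw [canA_false, canA_false]
    rw [contains_split ((s.drop lo).take (hi - lo)) ((hi - lo) / 2) (by omega)]
    rw [htake, hdrop, hget]
    have hb : (s[(lo + hi) / 2]'hmid == '1') = false := by simp [hg]
    simp [hb]
theorem canA_nil (b : Bool) : canA [] b = true := by
  rw [canA]; simp

theorem fitsLoop_eq (s : List Char) (stack : List (Nat × Nat))
    (hstack : ∀ p ∈ stack, p.1 < p.2 ∧ p.2 ≤ s.length) :
    fitsLoop s stack = stack.all (fun p => canA ((s.drop p.1).take (p.2 - p.1)) true) := by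
  generalize hm : (stack.map (fun p => p.2 - p.1)).sum * 2 + stack.length = m
  induction m using Nat.strong_induction_on generalizing stack with
  | _ m ih =>
    subst hm
    cases stack with
    | nil => simp [fitsLoop]
    | cons p rest =>
      obtain ⟨lo, hi⟩ := p
      have hrest : ∀ q ∈ rest, q.1 < q.2 ∧ q.2 ≤ s.length :=
        fun q hq => hstack q (List.mem_cons_of_mem _ hq)
      have hp := hstack (lo, hi) List.mem_cons_self
      have hlo : lo < hi := hp.1
      have hhi : hi ≤ s.length := hp.2
      have hmid : (lo + hi) / 2 < s.length := by omega
      rw [fitsLoop, dif_pos hlo]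
      simp only [PySem.List.pyGet?_natCast, List.getElem?_eq_getElem hmid, Option.some.injEq,
        PySem.List.slice_natCast]
      rw [List.all_cons, canA_seg s lo hi hlo hhi hmid]
      by_cases hg : s[(lo + hi) / 2]'hmid = '1'
      · rw [if_pos hg, if_pos hg]
        by_cases hR : (lo + hi) / 2 + 1 < hi <;> by_cases hL : lo < (lo + hi) / 2 <;>
          simp only [hR, hL, if_true, if_false]
        · rw [ih _ (by simp only [List.map_append, List.sum_append, List.length_append,
              List.map_cons, List.sum_cons, List.map_nil, List.sum_nil, List.length_cons,
              List.length_nil]; omega) _ (by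
              intro q hq
              simp only [List.cons_append, List.nil_append, List.mem_cons] at hq
              rcases hq with h | h | h
              · rw [h]; exact ⟨hR, hhi⟩
              · rw [h]; exact ⟨hL, by omega⟩
              · exact hrest q h) rfl]
          simp only [List.cons_append, List.nil_append, List.all_cons]
          simp [Bool.and_comm, Bool.and_assoc]
        · have h0 : (lo + hi) / 2 - lo = 0 := by omega
          rw [ih _ (by simp only [List.map_append, List.sum_append, List.length_append,
              List.map_cons, List.sum_cons, List.map_nil, List.sum_nil, List.length_cons,
              List.length_nil]; omega) _ (by
              intro q hq
              simp only [List.cons_append, List.nil_append, List.mem_cons] at hq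
              rcases hq with h | h
              · rw [h]; exact ⟨hR, hhi⟩
              · exact hrest q h) rfl]
          simp [h0, canA_nil]
        · have h0 : hi - ((lo + hi) / 2 + 1) = 0 := by omega
          rw [ih _ (by simp only [List.map_append, List.sum_append, List.length_append,
              List.map_cons, List.sum_cons, List.map_nil, List.sum_nil, List.length_cons,
              List.length_nil]; omega) _ (by
              intro q hq
              simp only [List.cons_append, List.nil_append, List.mem_cons] at hq
              rcases hq with h | h
              · rw [h]; exact ⟨hL, by omega⟩
              · exact hrest q h) rfl]
          simp [h0, canA_nil]
        · -- hi = lo + 1 : both children empty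
          have h0 : (lo + hi) / 2 - lo = 0 := by omega
          have h1 : hi - ((lo + hi) / 2 + 1) = 0 := by omega
          simp only [List.nil_append]
          rw [ih _ (by simp only [List.map_cons, List.sum_cons, List.length_cons]; omega) _
            hrest rfl]
          simp [h0, h1, canA_nil]
      · rw [if_neg hg, if_neg hg]
        by_cases hc : '1' ∈ (s.drop lo).take (hi - lo)
        · rw [if_pos (by simpa using hc)]
          simp [hc]
        · rw [if_neg (by simpa using hc), ih _ (by
            simp only [List.map_cons, List.sum_cons, List.length_cons]; omega) _ hrest rfl]
          simp [hc]
theorem fits_eq (s : List Char) (size : Nat) (h0 : 0 < size) (hlen : s.length = size) :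
    fits s size = canA s true := by
  rw [fits, fitsLoop_eq s [(0, size)]
    (by intro q hq; simp only [List.mem_singleton] at hq; rw [hq]; exact ⟨h0, by omega⟩)]
  simp [← hlen]

theorem checkB_eq (bits : List Char) (n : Nat) (L : List Nat)
    (hn : n = bits.length) (hL : ∀ x ∈ L, 0 < x) :
    (if tryNodes bits n L then (1 : Int) else 0) = checkB bits n L := by
  induction L with
  | nil => simp [tryNodes, checkB]
  | cons size rest ih =>
    have ih' := ih (fun x hx => hL x (List.mem_cons_of_mem _ hx))
    rw [tryNodes, checkB]
    by_cases hns : n ≤ size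
    · have hlen' : (List.replicate (size - n) '0' ++ bits).length = size := by
        simp [hn.symm]; omega
      rw [fits_eq _ _ (hL size List.mem_cons_self) hlen']
      by_cases hcan : canA (List.replicate (size - n) '0' ++ bits) true = true
      · simp [hns, hcan]
      · simp only [Bool.not_eq_true] at hcan
        simp [hns, hcan, ih']
    · simp [hns, ih']

-- ===== VERDICT (by name: the statement is the Claim_ definition above) =====
theorem solution_spec : Claim_equal_solution := by
  intro numbers _
  unfold Spec_solution solution solution_alt
  rw [PySem.List.foldl_append_singleton_eq_map]
  exact List.map_congr_left (fun x _ => checkB_eq _ _ _ rfl (by decide))
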